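-- pv_equiv track=rewrite | github.com/yukhldkv/hexlet-solutions | module_2/1_dictionaries_and_sets/trials/gen_diff.py | gen_diff
-- ===== SOURCE A (Python) =====
-- def gen_diff(first: dict, second: dict) -> dict:
--     comparison = {}
--     for element in first:
--         if element in second:
--             if first[element] == second[element]:
--                 comparison.setdefault(element, "unchanged")
--             if first[element] != second[element]:
--                 comparison.setdefault(element, "changed")
--         else:
--             comparison.setdefault(element, "deleted")
--     for element in second:
--         if element not in first:
--             comparison.setdefault(element, "added")
--     return comparison
-- ===== SOURCE B (Python) =====
-- def gen_diff(first: dict, second: dict) -> dict: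
--     # Build one merged slot table: key -> (value in first or None, value in second or None),
--     # then classify each slot's shape. No membership tests of one dict against the other.
--     slots = {}
--     for key, value in first.items():
--         slots[key] = (value, None)
--     for key, value in second.items():
--         slots[key] = (slots.get(key, (None, None))[0], value)
--
--     def classify(pair):
--         left, right = pair
--         if left is None:
--             return "added"
--         if right is None:
--             return "deleted"
--         return "unchanged" if left == right else "changed"
--
--     return {key: classify(pair) for key, pair in slots.items()}
-- ===== Notes on version B (the rewrite author's own statement) =====
-- stated objective: alternative
-- what changed: B builds a single merged slot table mapping each key to an (in-first, in-second) value pair in two streaming passes and classifies each slot's shape, instead of A's two scans that filter each dict's keys by membership in the other dict.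
import Mathlib
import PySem

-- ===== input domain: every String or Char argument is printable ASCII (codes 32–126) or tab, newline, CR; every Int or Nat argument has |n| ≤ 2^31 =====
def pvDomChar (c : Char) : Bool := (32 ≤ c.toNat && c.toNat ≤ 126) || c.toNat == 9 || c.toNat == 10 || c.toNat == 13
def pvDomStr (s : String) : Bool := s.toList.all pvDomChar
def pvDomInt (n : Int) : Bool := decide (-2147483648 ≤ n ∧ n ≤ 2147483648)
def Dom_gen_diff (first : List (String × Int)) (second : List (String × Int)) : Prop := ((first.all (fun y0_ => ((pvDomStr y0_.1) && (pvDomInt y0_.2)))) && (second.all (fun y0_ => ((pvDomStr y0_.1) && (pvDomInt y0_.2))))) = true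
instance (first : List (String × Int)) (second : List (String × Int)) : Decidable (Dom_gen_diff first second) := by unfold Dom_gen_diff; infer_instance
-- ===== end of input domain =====

-- B builds one merged slot table key -> (value-in-first?, value-in-second?) in two streaming
-- passes and classifies each slot's shape, instead of A's membership-filtered scans (objective: alternative).

-- ===== PORT A =====
def gen_diff (first : List (String × Int)) (second : List (String × Int)) : List (String × String) :=
  let firstD : PySem.Dict String Int := PySem.Dict.mk first
  let secondD : PySem.Dict String Int := PySem.Dict.mk second
  let comparison : PySem.Dict String String :=
    first.foldl (fun comparison kv =>
      let element := kv.1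
      if secondD.contains element then
        let comparison :=
          if firstD.get? element = secondD.get? element then
            comparison.setdefault element "unchanged"
          else comparison
        if firstD.get? element ≠ secondD.get? element then
          comparison.setdefault element "changed"
        else comparison
      else
        comparison.setdefault element "deleted") PySem.Dict.empty
  let comparison :=
    second.foldl (fun comparison kv =>
      if ¬ (firstD.contains kv.1 = true) then
        comparison.setdefault kv.1 "added"
      else comparison) comparison
  comparison.items

-- ===== PORT B =====
-- the inner 'classify(pair)' helper of Source B
def gdClassify (pair : Option Int × Option Int) : String :=
  match pair with
  | (none, _) => "added"
  | (some _, none) => "deleted"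
  | (some left, some right) => if left = right then "unchanged" else "changed"

def gen_diff_alt (first : List (String × Int)) (second : List (String × Int)) : List (String × String) :=
  let firstD : PySem.Dict String Int := PySem.Dict.mk first
  let secondD : PySem.Dict String Int := PySem.Dict.mk second
  let slots : PySem.Dict String (Option Int × Option Int) :=
    firstD.items.foldl (fun slots kv => slots.insert kv.1 (some kv.2, none)) PySem.Dict.empty
  let slots : PySem.Dict String (Option Int × Option Int) :=
    secondD.items.foldl (fun slots kv =>
      slots.insert kv.1 ((slots.getD kv.1 (none, none)).1, some kv.2)) slots
  (PySem.Dict.mk (slots.items.map (fun p => (p.1, gdClassify p.2)))).items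

-- ===== PRECONDITION & SPEC =====
-- Pre_ requires each association list to have unique keys: the Python arguments are dicts,
-- so a list with a duplicated key encodes no Python input at all (nothing A returns on is excluded).
def Pre_gen_diff (first : List (String × Int)) (second : List (String × Int)) : Prop :=
  (first.map Prod.fst).Nodup ∧ (second.map Prod.fst).Nodup
instance (first : List (String × Int)) (second : List (String × Int)) : Decidable (Pre_gen_diff first second) := by unfold Pre_gen_diff; infer_instance
def pvWitness_gen_diff : (List (String × Int)) × (List (String × Int)) :=
  ([("a", 1), ("b", 2)], [("b", 3), ("c", 4)])
def Spec_gen_diff (first : List (String × Int)) (second : List (String × Int)) (out : List (String × String)) : Prop := out = gen_diff_alt first second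
instance (first : List (String × Int)) (second : List (String × Int)) (out : List (String × String)) : Decidable (Spec_gen_diff first second out) := by unfold Spec_gen_diff; infer_instance

-- ===== CLAIM (what is proved, stated in full; the proofs are below) =====
def Claim_equal_gen_diff : Prop := ∀ (first : List (String × Int)) (second : List (String × Int)), Dom_gen_diff first second → Pre_gen_diff first second → Spec_gen_diff first second (gen_diff first second)

-- ===== LEMMAS AND PROOFS =====

-- A's per-key status, the common reference point of both characterisations
def gdStatus (firstD : PySem.Dict String Int) (secondD : PySem.Dict String Int)
    (key : String) : String :=
  if ¬ (firstD.contains key = true) then "added"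
  else if ¬ (secondD.contains key = true) then "deleted"
  else if firstD.get? key = secondD.get? key then "unchanged" else "changed"

-- the canonical value both programs compute
def gdCanon (first : List (String × Int)) (second : List (String × Int)) : List (String × String) :=
  (PySem.Set.update (PySem.Set.ofList (first.map (·.1))) (second.map (·.1))).map
    (fun k => (k, gdStatus (PySem.Dict.mk first) (PySem.Dict.mk second) k))

-- A's per-key status as computed by the first loop's branches
def gdS1 (firstD : PySem.Dict String Int) (secondD : PySem.Dict String Int)
    (k : String) : String :=
  if secondD.contains k then
    (if firstD.get? k = secondD.get? k then "unchanged" else "changed")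
  else "deleted"

lemma sdfold_get? (g : String → String) (ks : List String)
    (d : PySem.Dict String String) (x : String) :
    (ks.foldl (fun c k => c.setdefault k (g k)) d).get? x
      = if d.contains x then d.get? x
        else if x ∈ ks then some (g x) else none := by
  induction ks generalizing d with
  | nil =>
    rw [PySem.Dict.contains_eq_isSome_get?]
    cases h : d.get? x <;> simp [h]
  | cons k ks ih =>
    simp only [List.foldl_cons, ih]
    by_cases hc : d.contains k = true
    · rw [PySem.Dict.setdefault_of_contains _ _ hc]
      by_cases hx : x = k
      · subst hx; simp [hc]
      · simp [List.mem_cons, hx]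
    · rw [PySem.Dict.setdefault_of_not_contains _ _ (by simpa using hc)]
      by_cases hx : x = k
      · subst hx
        simp [PySem.Dict.contains_insert_self, PySem.Dict.get?_insert_self, hc]
      · simp [PySem.Dict.contains_insert, PySem.Dict.get?_insert, hx,
          List.mem_cons]

lemma sdfold_keys (g : String → String) (ks : List String)
    (d : PySem.Dict String String) :
    (ks.foldl (fun c k => c.setdefault k (g k)) d).keys
      = PySem.Set.update d.keys ks := by
  induction ks generalizing d with
  | nil => simp [PySem.Set.update]
  | cons k ks ih =>
    simp only [List.foldl_cons, ih, PySem.Set.update_cons]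
    congr 1
    rw [PySem.Dict.keys_setdefault, PySem.Set.add_eq_ite,
      PySem.Dict.contains_eq_decide_mem_keys]
    by_cases h : k ∈ d.keys <;> simp [h]

lemma loop2_filter (p : String → Bool) (xs : List (String × Int))
    (d : PySem.Dict String String) :
    xs.foldl (fun c kv => if ¬ (p kv.1 = true) then c.setdefault kv.1 "added" else c) d
      = (xs.filter (fun kv => !p kv.1)).foldl (fun c kv => c.setdefault kv.1 "added") d := by
  induction xs generalizing d with
  | nil => rfl
  | cons kv xs ih =>
    by_cases h : p kv.1 = true
    · rw [List.foldl_cons, if_neg (by simp [h]), List.filter_cons_of_neg (by simp [h])]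
      exact ih d
    · rw [List.foldl_cons, if_pos (by simp [h]), List.filter_cons_of_pos (by simp [h]),
        List.foldl_cons]
      exact ih _

lemma map_fst_filter (d : PySem.Dict String Int) (xs : List (String × Int)) :
    (xs.filter (fun kv => !d.contains kv.1)).map (·.1)
      = (xs.map (·.1)).filter (fun k => !d.contains k) := by
  induction xs with
  | nil => rfl
  | cons kv xs ih => by_cases h : d.contains kv.1 = true <;> simp [h, ih]

lemma ofList_filter (p : String → Bool) (l : List String) :
    PySem.Set.ofList (l.filter p) = (PySem.Set.ofList l).filter p := by
  induction l with
  | nil => rfl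
  | cons x l ih =>
    by_cases h : p x = true
    · rw [List.filter_cons_of_pos h, PySem.Set.ofList_cons, PySem.Set.ofList_cons, ih]
      simp only [PySem.Set.discard, List.filter_cons_of_pos h, List.filter_filter]
      congr 1
      exact List.filter_congr (fun y _ => by by_cases hy : y = x <;> simp [hy, h, Bool.and_comm])
    · rw [List.filter_cons_of_neg h, PySem.Set.ofList_cons, ih]
      simp only [List.filter_cons_of_neg h, PySem.Set.discard, List.filter_filter]
      exact (List.filter_congr (fun y _ => by
        by_cases hy : y = x <;> simp [hy, h])).symm

-- A computes the canonical value (no Nodup needed)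
lemma gen_diff_eq_canon (first second : List (String × Int)) :
    gen_diff first second = gdCanon first second := by
  simp only [gen_diff, gdCanon]
  set fD : PySem.Dict String Int := PySem.Dict.mk first with hfD
  set sD : PySem.Dict String Int := PySem.Dict.mk second with hsD
  set ks1 : List String := first.map (·.1) with hks1
  set ks2 : List String := second.map (·.1) with hks2
  have hbody : (fun (comparison : PySem.Dict String String) (kv : String × Int) =>
      let element := kv.1
      if sD.contains element then
        let comparison :=
          if fD.get? element = sD.get? element then
            comparison.setdefault element "unchanged"
          else comparison
        if fD.get? element ≠ sD.get? element then
          comparison.setdefault element "changed"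
        else comparison
      else
        comparison.setdefault element "deleted")
      = fun comparison kv => comparison.setdefault kv.1 (gdS1 fD sD kv.1) := by
    funext comparison kv
    simp only [gdS1]
    by_cases h1 : sD.contains kv.1 = true
    · by_cases h2 : fD.get? kv.1 = sD.get? kv.1 <;> simp [h1, h2]
    · simp [h1]
  rw [hbody, loop2_filter (fun k => fD.contains k)]
  rw [← List.foldl_map (f := (·.1)) (g := fun c k => PySem.Dict.setdefault c k (gdS1 fD sD k)) (l := first)]
  have hmapfold : ∀ (xs : List (String × Int)) (d : PySem.Dict String String),
      xs.foldl (fun c kv => c.setdefault kv.1 "added") d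
        = (xs.map (·.1)).foldl (fun c k => c.setdefault k "added") d := by
    intro xs d; rw [List.foldl_map]
  rw [hmapfold, map_fst_filter fD second, ← hks1, ← hks2]
  set R1 : PySem.Dict String String :=
    ks1.foldl (fun c k => c.setdefault k (gdS1 fD sD k)) PySem.Dict.empty with hR1
  set ks2' : List String := ks2.filter (fun k => !fD.contains k) with hks2'
  set R : PySem.Dict String String :=
    ks2'.foldl (fun c k => c.setdefault k "added") R1 with hR
  have hfk : fD.keys = ks1 := by rw [hfD, hks1]; exact PySem.Dict.keys_mk first
  have hcf : ∀ k : String, fD.contains k = decide (k ∈ ks1) := by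
    intro k; rw [PySem.Dict.contains_eq_decide_mem_keys, hfk]
  have hRkeys : R.keys = PySem.Set.update (PySem.Set.ofList ks1) ks2' := by
    rw [hR, sdfold_keys, hR1, sdfold_keys]
    simp [PySem.Set.update_nil_left]
  have hkeq : PySem.Set.update (PySem.Set.ofList ks1) ks2'
      = PySem.Set.update (PySem.Set.ofList ks1) ks2 := by
    rw [PySem.Set.update_eq_append_filter, PySem.Set.update_eq_append_filter]
    congr 1
    rw [hks2', ofList_filter, List.filter_filter]
    exact List.filter_congr (fun y _ => by
      simp only [hcf, PySem.Set.contains_eq_listContains]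
      by_cases hy : y ∈ ks1 <;> simp [hy])
  have hnd : R.keys.Nodup := by
    rw [hRkeys]
    exact PySem.Set.nodup_update _ _ (PySem.Set.nodup_ofList ks1)
  rw [PySem.Dict.items_eq_map_keys R hnd "", hRkeys, hkeq]
  refine List.map_congr_left ?_
  intro k hk
  have hk' : k ∈ ks1 ∨ k ∈ ks2 := by
    have h := (PySem.Set.mem_update _ _ k).mp hk
    simpa [PySem.Set.mem_ofList] using h
  have hRget : R.get? k = if R1.contains k then R1.get? k
      else if k ∈ ks2' then some "added" else none := by
    rw [hR, sdfold_get?]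
  have hR1get : R1.get? k = if k ∈ ks1 then some (gdS1 fD sD k) else none := by
    rw [hR1, sdfold_get?]; simp
  have hgoal : R.getD k "" = gdStatus fD sD k := by
    by_cases h1 : k ∈ ks1
    · have : R.get? k = some (gdS1 fD sD k) := by
        rw [hRget, hR1get]
        simp [PySem.Dict.contains_eq_isSome_get?, hR1get, h1]
      rw [PySem.Dict.getD_eq_get?_getD, this]
      simp only [Option.getD_some, gdS1, gdStatus, hcf k, h1]
      by_cases h2 : sD.contains k = true <;> simp [h2]
    · have h2 : k ∈ ks2 := hk'.resolve_left h1
      have hmem2 : k ∈ ks2' := by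
        rw [hks2']; exact List.mem_filter.mpr ⟨h2, by simp [hcf k, h1]⟩
      have : R.get? k = some "added" := by
        rw [hRget, hR1get]
        simp [PySem.Dict.contains_eq_isSome_get?, hR1get, h1, hmem2]
      rw [PySem.Dict.getD_eq_get?_getD, this]
      simp [gdStatus, hcf k, h1]
  rw [hgoal]

-- B-side: lookup after the first slot-filling pass (over a duplicate-free association list)
lemma slots1_get? (xs : List (String × Int)) (hx : (xs.map Prod.fst).Nodup)
    (g : PySem.Dict String (Option Int × Option Int)) (k : String) :
    (xs.foldl (fun slots kv => slots.insert kv.1 (some kv.2, none)) g).get? k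
      = match (PySem.Dict.mk xs).get? k with
        | some v => some (some v, none)
        | none => g.get? k := by
  induction xs generalizing g with
  | nil => rfl
  | cons kv xs ih =>
    rw [List.map_cons, List.nodup_cons] at hx
    rw [List.foldl_cons, ih hx.2, PySem.Dict.get?_mk_cons]
    by_cases hk : kv.1 = k
    · subst hk
      have hnone : (PySem.Dict.mk xs).get? kv.1 = none := by
        rw [PySem.Dict.get?_eq_none_iff_not_mem_keys, PySem.Dict.keys_mk]
        exact hx.1
      simp [hnone, PySem.Dict.get?_insert_self]
    · simp only [beq_iff_eq, hk, if_false]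
      cases h : (PySem.Dict.mk xs).get? k
      · simp [PySem.Dict.get?_insert_of_ne _ _ (Ne.symm hk)]
      · rfl

-- lookup after the second slot-filling pass: the left component is preserved, the right one set
lemma slots2_get? (xs : List (String × Int)) (hx : (xs.map Prod.fst).Nodup)
    (g : PySem.Dict String (Option Int × Option Int)) (k : String) :
    (xs.foldl (fun slots kv =>
        slots.insert kv.1 ((slots.getD kv.1 (none, none)).1, some kv.2)) g).get? k
      = match (PySem.Dict.mk xs).get? k with
        | some v => some ((g.getD k (none, none)).1, some v)
        | none => g.get? k := by
  induction xs generalizing g with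
  | nil => rfl
  | cons kv xs ih =>
    rw [List.map_cons, List.nodup_cons] at hx
    rw [List.foldl_cons, ih hx.2, PySem.Dict.get?_mk_cons]
    by_cases hk : kv.1 = k
    · subst hk
      have hnone : (PySem.Dict.mk xs).get? kv.1 = none := by
        rw [PySem.Dict.get?_eq_none_iff_not_mem_keys, PySem.Dict.keys_mk]
        exact hx.1
      simp [hnone, PySem.Dict.get?_insert_self]
    · simp only [beq_iff_eq, hk, if_false]
      have hD : ((g.insert kv.1 ((g.getD kv.1 (none, none)).1, some kv.2)).getD k (none, none))
          = g.getD k (none, none) := PySem.Dict.getD_insert_of_ne _ _ _ (Ne.symm hk)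
      cases h : (PySem.Dict.mk xs).get? k
      · simp [PySem.Dict.get?_insert_of_ne _ _ (Ne.symm hk)]
      · rw [hD]

-- B computes the canonical value (given duplicate-free keys)
lemma gen_diff_alt_eq_canon (first second : List (String × Int))
    (h1 : (first.map Prod.fst).Nodup) (h2 : (second.map Prod.fst).Nodup) :
    gen_diff_alt first second = gdCanon first second := by
  simp only [gen_diff_alt, gdCanon]
  set fD : PySem.Dict String Int := PySem.Dict.mk first with hfD
  set sD : PySem.Dict String Int := PySem.Dict.mk second with hsD
  set S1 : PySem.Dict String (Option Int × Option Int) :=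
    fD.items.foldl (fun slots kv => slots.insert kv.1 (some kv.2, none)) PySem.Dict.empty with hS1
  set S2 : PySem.Dict String (Option Int × Option Int) :=
    sD.items.foldl (fun slots kv =>
      slots.insert kv.1 ((slots.getD kv.1 (none, none)).1, some kv.2)) S1 with hS2
  have hfitems : fD.items = first := rfl
  have hsitems : sD.items = second := rfl
  have hS1get : ∀ k, S1.get? k = (fD.get? k).map (fun v => (some v, none)) := by
    intro k
    rw [hS1, hfitems, slots1_get? first h1]
    cases h : fD.get? k <;> simp
  have hS2get : ∀ k, S2.get? k
      = match sD.get? k with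
        | some v => some (fD.get? k, some v)
        | none => S1.get? k := by
    intro k
    rw [hS2, hsitems, slots2_get? second h2]
    cases hs : sD.get? k
    · rfl
    · have hfst : (S1.getD k (none, none)).1 = fD.get? k := by
        rw [PySem.Dict.getD_eq_get?_getD, hS1get k]
        cases hf : fD.get? k <;> simp
      simp [hfst]
  have hnd2 : S2.keys.Nodup := by
    rw [hS2, hsitems]
    refine PySem.Dict.nodup_keys_foldl_insert_key second Prod.fst _ S1 ?_
    rw [hS1, hfitems]
    exact PySem.Dict.nodup_keys_foldl_insert_key first Prod.fst _ PySem.Dict.empty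
      PySem.Dict.nodup_keys_empty
  have hkeys2 : S2.keys
      = PySem.Set.update (PySem.Set.ofList (first.map (·.1))) (second.map (·.1)) := by
    rw [hS2, hsitems, PySem.Dict.keys_foldl_insert_key, hS1, hfitems,
      PySem.Dict.keys_foldl_insert_key, PySem.Dict.keys_empty, PySem.Set.update_nil_left]
  have hmain : (S2.items.map (fun p => (p.1, gdClassify p.2)))
      = (PySem.Set.update (PySem.Set.ofList (first.map (·.1))) (second.map (·.1))).map
          (fun k => (k, gdStatus fD sD k)) := by
    rw [PySem.Dict.items_eq_map_keys S2 hnd2 (none, none), List.map_map, hkeys2]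
    refine List.map_congr_left ?_
    intro k hk
    have hk' : k ∈ first.map (·.1) ∨ k ∈ second.map (·.1) := by
      have h := (PySem.Set.mem_update _ _ k).mp hk
      simpa [PySem.Set.mem_ofList] using h
    have hfnone : fD.get? k = none ↔ ¬ k ∈ first.map (·.1) := by
      rw [hfD, PySem.Dict.get?_eq_none_iff_not_mem_keys, PySem.Dict.keys_mk]
    have hsnone : sD.get? k = none ↔ ¬ k ∈ second.map (·.1) := by
      rw [hsD, PySem.Dict.get?_eq_none_iff_not_mem_keys, PySem.Dict.keys_mk]
    simp only [Function.comp, PySem.Dict.getD_eq_get?_getD, hS2get k]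
    cases hf : fD.get? k with
    | none =>
      -- key only in second: "added" on both sides
      cases hs : sD.get? k with
      | none =>
        rcases hk' with hmem | hmem
        · exact absurd (hfnone.mp hf) (by simp [hmem])
        · exact absurd (hsnone.mp hs) (by simp [hmem])
      | some sv =>
        have hcf : fD.contains k = false := by
          rw [PySem.Dict.contains_eq_isSome_get?, hf]; rfl
        simp [gdClassify, gdStatus, hcf]
    | some fv =>
      have hcf : fD.contains k = true := by
        rw [PySem.Dict.contains_eq_isSome_get?, hf]; rfl
      cases hs : sD.get? k with
      | none =>
        have hcs : sD.contains k = false := by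
          rw [PySem.Dict.contains_eq_isSome_get?, hs]; rfl
        simp [hS1get k, hf, gdClassify, gdStatus, hcf, hcs]
      | some sv =>
        have hcs : sD.contains k = true := by
          rw [PySem.Dict.contains_eq_isSome_get?, hs]; rfl
        simp only [Option.getD_some, gdClassify, gdStatus, hcf, hcs, hf, hs,
          if_false, not_true_eq_false]
        by_cases hv : fv = sv <;> simp [hv]
  exact hmain

-- ===== VERDICT (by name: the statement is the Claim_ definition above) =====
theorem gen_diff_spec : Claim_equal_gen_diff := by
  intro first second _ hpre
  unfold Spec_gen_diff
  rw [gen_diff_eq_canon, gen_diff_alt_eq_canon first second hpre.1 hpre.2]
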